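-- pv_equiv track=rewrite | github.com/kebishpius/Leet-Code-Python | 2767-MaximumSumWithExactlyKElements/2767-MaximumSumWithExactlyKElements.py | maximizeSum
-- ===== SOURCE A (Python) =====
-- def maximizeSum(nums, k):
--     ans = 0
--     for i in range(k):
--         ans += max(nums) + i
--     return ans
--     """
--     :type nums: List[int]
--     :type k: int
--     :rtype: int
--     """
-- ===== SOURCE B (Python) =====
-- def maximizeSum(nums, k):
--     if k <= 0:
--         return 0
--     return k * max(nums) + k * (k - 1) // 2
-- ===== Notes on version B (the rewrite author's own statement) =====
-- stated objective: faster
-- what changed: replaces the loop that recomputes max(nums) k times with a single max and the closed form k*max + k*(k-1)//2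
import Mathlib
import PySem

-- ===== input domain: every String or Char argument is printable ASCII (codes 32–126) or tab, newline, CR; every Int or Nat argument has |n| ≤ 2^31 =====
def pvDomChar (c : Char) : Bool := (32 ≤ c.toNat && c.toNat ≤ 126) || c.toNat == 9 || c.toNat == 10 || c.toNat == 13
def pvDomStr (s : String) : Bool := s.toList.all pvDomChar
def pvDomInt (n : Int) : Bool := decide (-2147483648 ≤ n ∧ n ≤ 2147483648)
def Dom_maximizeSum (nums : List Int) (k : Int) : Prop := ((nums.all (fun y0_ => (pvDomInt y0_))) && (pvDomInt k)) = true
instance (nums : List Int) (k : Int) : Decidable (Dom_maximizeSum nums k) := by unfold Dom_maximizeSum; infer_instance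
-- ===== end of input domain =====

-- B replaces A's k-iteration loop (which recomputes max(nums) each pass) by one max and the closed form k*max + k*(k-1)//2.

-- ===== PORT A =====
-- 'max(nums)' is PySem.List.max?; Pre_ guarantees it is some when the loop runs, getD 0 is never reached inside Pre_.
def maximizeSum (nums : List Int) (k : Int) : Int :=
  (PySem.List.pyRange 0 k 1).foldl
    (fun ans i => ans + (PySem.List.max? nums (fun x => x)).getD 0 + i) 0

-- ===== PORT B =====
def maximizeSum_alt (nums : List Int) (k : Int) : Int :=
  if k ≤ 0 then 0
  else k * (PySem.List.max? nums (fun x => x)).getD 0 + PySem.Int.floordiv (k * (k - 1)) 2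

-- ===== PRECONDITION & SPEC =====
-- A raises ValueError (max of empty list) when nums = [] and k > 0; excluded. B raises there too.
def Pre_maximizeSum (nums : List Int) (k : Int) : Prop := nums ≠ [] ∨ k ≤ 0
instance (nums : List Int) (k : Int) : Decidable (Pre_maximizeSum nums k) := by unfold Pre_maximizeSum; infer_instance
def pvWitness_maximizeSum : List Int × Int := ([3, 1, 2], 4)

def Spec_maximizeSum (nums : List Int) (k : Int) (out : Int) : Prop := out = maximizeSum_alt nums k
instance (nums : List Int) (k : Int) (out : Int) : Decidable (Spec_maximizeSum nums k out) := by unfold Spec_maximizeSum; infer_instance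

-- ===== CLAIM (what is proved, stated in full; the proofs are below) =====
def Claim_equal_maximizeSum : Prop := ∀ (nums : List Int) (k : Int), Dom_maximizeSum nums k → Pre_maximizeSum nums k → Spec_maximizeSum nums k (maximizeSum nums k)

-- ===== LEMMAS AND PROOFS =====

-- Closed form of A's loop: doubled sum over range n, proved by induction on n.
theorem two_mul_loop (m : Int) (n : Nat) :
    2 * ((List.range n).foldl (fun (ans : Int) (j : Nat) => ans + m + (j : Int)) 0)
      = 2 * n * m + n * (n - 1) := by
  induction n with
  | zero => simp
  | succ n ih =>
    rw [List.range_succ, List.foldl_append]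
    simp only [List.foldl_cons, List.foldl_nil]
    push_cast
    ring_nf
    ring_nf at ih
    omega

theorem loop_closed (m : Int) (n : Nat) :
    (List.range n).foldl (fun (ans : Int) (j : Nat) => ans + m + (j : Int)) 0
      = (n : Int) * m + PySem.Int.floordiv ((n : Int) * ((n : Int) - 1)) 2 := by
  have h := two_mul_loop m n
  have hd : (n : Int) * ((n : Int) - 1) =
      2 * ((List.range n).foldl (fun (ans : Int) (j : Nat) => ans + m + (j : Int)) 0 - (n : Int) * m) := by
    linear_combination (-1 : Int) * h
  rw [hd, PySem.Int.floordiv_eq_ediv_of_pos (by omega)]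
  rw [Int.mul_ediv_cancel_left _ (by omega : (2:Int) ≠ 0)]
  ring

-- ===== VERDICT (by name: the statement is the Claim_ definition above) =====
theorem maximizeSum_spec : Claim_equal_maximizeSum := by
  intro nums k _ _
  unfold Spec_maximizeSum maximizeSum maximizeSum_alt
  set m := (PySem.List.max? nums (fun x => x)).getD 0 with hm
  by_cases hk : k ≤ 0
  · have : PySem.List.pyRange 0 k 1 = [] := by
      simp [PySem.List.pyRange_one]
      omega
    simp [this, hk]
  · have hk' : 0 < k := by omega
    rw [if_neg hk]
    rw [PySem.List.pyRange_one]
    rw [List.foldl_map]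
    have hkn : ((k.toNat : Int)) = k := Int.toNat_of_nonneg (by omega)
    have : (k - 0).toNat = k.toNat := by omega
    rw [this]
    have := loop_closed m k.toNat
    simp only [zero_add] at this ⊢
    rw [this, hkn]
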